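-- pv_equiv track=rewrite | github.com/MrBrantCode/unitest_baseline | mut_generate/mist_train_taco/taco_2875/solution.py | sum_of_divisors_of_divisors
-- ===== SOURCE A (Python) =====
-- def sum_of_divisors_of_divisors(N: int) -> int:
--     total_sum = 0
--     for i in range(1, N + 1):
--         if N % i == 0:
--             for j in range(1, i + 1):
--                 if i % j == 0:
--                     total_sum += j
--     return total_sum
-- ===== SOURCE B (Python) =====
-- def _sigma(m: int) -> int:
--     # sum of divisors of m via paired trial division up to sqrt(m)
--     s = 0
--     d = 1
--     while d * d <= m:
--         if m % d == 0:
--             e = m // d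
--             if e != d:
--                 s = s + d + e
--             else:
--                 s = s + d
--         d += 1
--     return s
--
--
-- def sum_of_divisors_of_divisors(N: int) -> int:
--     # enumerate divisors of N in pairs up to sqrt(N); sum sigma of each
--     total = 0
--     d = 1
--     while d * d <= N:
--         if N % d == 0:
--             e = N // d
--             if e != d:
--                 total = total + _sigma(d) + _sigma(e)
--             else:
--                 total = total + _sigma(d)
--         d += 1
--     return total
-- ===== Notes on version B (the rewrite author's own statement) =====
-- stated objective: faster
-- what changed: B enumerates only the divisors of N by paired trial division up to sqrt(N) and computes each divisor's sigma the same sqrt-paired way, replacing A's full 1..N scan with a nested full 1..i scan.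
import Mathlib
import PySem

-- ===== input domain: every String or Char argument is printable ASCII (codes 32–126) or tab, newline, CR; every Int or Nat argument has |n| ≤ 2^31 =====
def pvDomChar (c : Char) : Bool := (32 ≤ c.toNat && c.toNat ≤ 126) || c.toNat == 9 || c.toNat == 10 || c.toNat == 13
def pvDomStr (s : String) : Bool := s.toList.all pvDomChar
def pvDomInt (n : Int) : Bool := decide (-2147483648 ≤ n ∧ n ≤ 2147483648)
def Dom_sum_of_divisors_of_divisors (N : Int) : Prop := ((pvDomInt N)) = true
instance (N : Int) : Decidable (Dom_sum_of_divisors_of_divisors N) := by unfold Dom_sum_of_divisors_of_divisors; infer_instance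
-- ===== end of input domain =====

-- B replaces A's full scan 1..N (with a full inner scan 1..i per divisor) by paired trial
-- division up to sqrt: it enumerates the divisors of N in pairs (d, N//d) with d*d ≤ N and
-- computes each divisor's sigma the same sqrt-paired way.

-- ===== PORT A =====
def sum_of_divisors_of_divisors (N : Int) : Int :=
  (PySem.List.pyRange 1 (N + 1) 1).foldl
    (fun total_sum i =>
      if PySem.Int.mod N i = 0 then
        (PySem.List.pyRange 1 (i + 1) 1).foldl
          (fun t j => if PySem.Int.mod i j = 0 then t + j else t) total_sum
      else total_sum) 0

-- ===== PORT B =====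
-- termination helper for the two while-loops: the loop counter is bounded by m once d*d ≤ m
theorem pvMeasureLt (m d : Int) (h : d * d ≤ m) :
    (m + 1 - (d + 1)).toNat < (m + 1 - d).toNat := by
  have hd : d ≤ m := by
    rcases (by omega : d ≤ 0 ∨ 0 < d) with h0 | h0
    · exact le_trans h0 (le_trans (mul_self_nonneg d) h)
    · nlinarith
  omega

-- while d*d <= m: if m % d == 0: e = m // d; s = s+d+e if e != d else s+d; d += 1
def pySigmaLoop (m d s : Int) : Int :=
  if h : d * d ≤ m then
    pySigmaLoop m (d + 1)
      (if PySem.Int.mod m d = 0 then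
        (let e := PySem.Int.floordiv m d
         if e ≠ d then s + d + e else s + d)
      else s)
  else s
termination_by (m + 1 - d).toNat
decreasing_by exact pvMeasureLt m d h

def pySigma (m : Int) : Int := pySigmaLoop m 1 0

-- while d*d <= N: if N % d == 0: e = N // d; total += sigma(d) (+ sigma(e) if e != d); d += 1
def pyOuterLoop (N d total : Int) : Int :=
  if h : d * d ≤ N then
    pyOuterLoop N (d + 1)
      (if PySem.Int.mod N d = 0 then
        (let e := PySem.Int.floordiv N d
         if e ≠ d then total + pySigma d + pySigma e else total + pySigma d)
      else total)
  else total
termination_by (N + 1 - d).toNat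
decreasing_by exact pvMeasureLt N d h

def sum_of_divisors_of_divisors_alt (N : Int) : Int := pyOuterLoop N 1 0

-- ===== PRECONDITION & SPEC =====
def Spec_sum_of_divisors_of_divisors (N : Int) (out : Int) : Prop := out = sum_of_divisors_of_divisors_alt N
instance (N : Int) (out : Int) : Decidable (Spec_sum_of_divisors_of_divisors N out) := by unfold Spec_sum_of_divisors_of_divisors; infer_instance

-- ===== CLAIM (what is proved, stated in full; the proofs are below) =====
def Claim_equal_sum_of_divisors_of_divisors : Prop := ∀ (N : Int), Dom_sum_of_divisors_of_divisors N → Spec_sum_of_divisors_of_divisors N (sum_of_divisors_of_divisors N)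

-- ===== LEMMAS AND PROOFS =====

-- Abstract form of B's two while-loops: add c d for d = start, start+1, … while d*d ≤ m.
def pvGenLoop (c : Int → Int) (m d s : Int) : Int :=
  if h : d * d ≤ m then pvGenLoop c m (d + 1) (s + c d) else s
termination_by (m + 1 - d).toNat
decreasing_by exact pvMeasureLt m d h

-- The per-iteration contribution of either loop.
def pvContrib (g : Int → Int) (m d : Int) : Int :=
  if PySem.Int.mod m d = 0 then
    g d + (if PySem.Int.floordiv m d ≠ d then g (PySem.Int.floordiv m d) else 0)
  else 0

theorem pvSigmaLoop_eq (m : Int) :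
    ∀ (f : ℕ) (d s : Int), (m + 1 - d).toNat ≤ f →
      pySigmaLoop m d s = pvGenLoop (pvContrib id m) m d s := by
  intro f
  induction f with
  | zero =>
    intro d s hf
    have hc : ¬ d * d ≤ m := by
      intro h
      have := pvMeasureLt m d h
      omega
    rw [pySigmaLoop, pvGenLoop, dif_neg hc, dif_neg hc]
  | succ f ih =>
    intro d s hf
    by_cases hc : d * d ≤ m
    · rw [pySigmaLoop, pvGenLoop, dif_pos hc, dif_pos hc]
      have hm := pvMeasureLt m d hc
      rw [ih (d + 1) _ (by omega)]
      congr 1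
      simp only [pvContrib, id_eq]
      split_ifs <;> ring
    · rw [pySigmaLoop, pvGenLoop, dif_neg hc, dif_neg hc]

theorem pvOuterLoop_eq (N : Int) :
    ∀ (f : ℕ) (d s : Int), (N + 1 - d).toNat ≤ f →
      pyOuterLoop N d s = pvGenLoop (pvContrib pySigma N) N d s := by
  intro f
  induction f with
  | zero =>
    intro d s hf
    have hc : ¬ d * d ≤ N := by
      intro h
      have := pvMeasureLt N d h
      omega
    rw [pyOuterLoop, pvGenLoop, dif_neg hc, dif_neg hc]
  | succ f ih =>
    intro d s hf
    by_cases hc : d * d ≤ N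
    · rw [pyOuterLoop, pvGenLoop, dif_pos hc, dif_pos hc]
      have hm := pvMeasureLt N d hc
      rw [ih (d + 1) _ (by omega)]
      congr 1
      simp only [pvContrib]
      split_ifs <;> ring
    · rw [pyOuterLoop, pvGenLoop, dif_neg hc, dif_neg hc]

-- The abstract loop from counter d sums c over the naturals d … sqrt n.
theorem pvGenLoop_sum (c : Int → Int) (n : ℕ) :
    ∀ (f d : ℕ) (s : Int), n.sqrt + 1 - d ≤ f →
      pvGenLoop c (n : Int) (d : Int) s = s + ∑ k ∈ Finset.Ico d (n.sqrt + 1), c (k : Int) := by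
  intro f
  induction f with
  | zero =>
    intro d s hf
    have hd : n.sqrt < d := by omega
    have hc : ¬ ((d : Int) * (d : Int) ≤ (n : Int)) := by
      have : ¬ d * d ≤ n := fun h => absurd (Nat.le_sqrt.mpr h) (by omega)
      exact_mod_cast this
    rw [pvGenLoop, dif_neg hc, Finset.Ico_eq_empty (by omega)]
    simp
  | succ f ih =>
    intro d s hf
    by_cases h : d ≤ n.sqrt
    · have hc : ((d : Int) * (d : Int) ≤ (n : Int)) := by exact_mod_cast Nat.le_sqrt.mp h
      rw [pvGenLoop, dif_pos hc]
      have hcast : ((d : Int) + 1) = ((d + 1 : ℕ) : Int) := by push_cast; ring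
      rw [hcast, ih (d + 1) _ (by omega),
        Finset.sum_eq_sum_Ico_succ_bot (show d < n.sqrt + 1 by omega) (fun k => c (k : Int))]
      ring
    · have hc : ¬ ((d : Int) * (d : Int) ≤ (n : Int)) := by
        have : ¬ d * d ≤ n := fun hh => absurd (Nat.le_sqrt.mpr hh) (by omega)
        exact_mod_cast this
      rw [pvGenLoop, dif_neg hc, Finset.Ico_eq_empty (by omega)]
      simp

-- Pairing d ↦ n/d matches the small divisors (≤ sqrt n) with the large ones.
theorem pvPairSum (n : ℕ) (g : ℕ → Int) :
    (∑ k ∈ Finset.Ico 1 (n.sqrt + 1),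
      if k ∣ n then g k + (if n / k ≠ k then g (n / k) else 0) else 0)
      = ∑ d ∈ n.divisors, g d := by
  rcases Nat.eq_zero_or_pos n with rfl | hn
  · simp
  have hs2 : n.sqrt * n.sqrt ≤ n := by simpa [sq] using Nat.sqrt_le' n
  have hlt : n < (n.sqrt + 1) * (n.sqrt + 1) := Nat.lt_succ_sqrt n
  have hspos : 0 < n.sqrt := by
    rcases Nat.eq_zero_or_pos n.sqrt with h0 | h0
    · rw [h0] at hlt; omega
    · exact h0
  rw [← Finset.sum_filter]
  have hset : (Finset.Ico 1 (n.sqrt + 1)).filter (· ∣ n) = n.divisors.filter (· ≤ n.sqrt) := by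
    ext k
    simp only [Finset.mem_filter, Finset.mem_Ico, Nat.mem_divisors, Nat.lt_succ_iff]
    constructor
    · rintro ⟨⟨h1, h2⟩, h3⟩; exact ⟨⟨h3, by omega⟩, h2⟩
    · rintro ⟨⟨h1, _⟩, h2⟩; exact ⟨⟨Nat.pos_of_dvd_of_pos h1 hn, h2⟩, h1⟩
  rw [hset, Finset.sum_add_distrib, ← Finset.sum_filter]
  have hbij : (∑ k ∈ (n.divisors.filter (· ≤ n.sqrt)).filter (fun k => n / k ≠ k), g (n / k))
      = ∑ d ∈ n.divisors.filter (fun d => ¬ d ≤ n.sqrt), g d := by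
    apply Finset.sum_nbij' (i := fun k => n / k) (j := fun d => n / d)
    · intro k hk
      simp only [Finset.mem_filter, Nat.mem_divisors] at hk ⊢
      obtain ⟨⟨⟨hdvd, hn0⟩, hle⟩, hne⟩ := hk
      refine ⟨⟨Nat.div_dvd_of_dvd hdvd, hn0⟩, ?_⟩
      intro hcle
      have hk1 : 0 < k := Nat.pos_of_dvd_of_pos hdvd hn
      have hmul : k * (n / k) = n := Nat.mul_div_cancel' hdvd
      have h1 : n ≤ n.sqrt * n.sqrt := by
        calc n = k * (n / k) := hmul.symm
          _ ≤ n.sqrt * n.sqrt := Nat.mul_le_mul hle hcle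
      have heqn : n.sqrt * n.sqrt = n := le_antisymm hs2 h1
      have h3 : n.sqrt * (n / k) = n.sqrt * n.sqrt := by
        have hA : k * (n / k) ≤ n.sqrt * (n / k) := Nat.mul_le_mul_right _ hle
        have hB : n.sqrt * (n / k) ≤ n.sqrt * n.sqrt := Nat.mul_le_mul_left _ hcle
        omega
      have hceq : n / k = n.sqrt := Nat.eq_of_mul_eq_mul_left hspos h3
      have hkeq : k = n.sqrt := by
        have : k * (n / k) = n.sqrt * (n / k) := by omega
        have hcpos : 0 < n / k := by rw [hceq]; exact hspos
        exact Nat.eq_of_mul_eq_mul_right hcpos this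
      exact hne (by rw [hceq, hkeq])
    · intro d hd
      simp only [Finset.mem_filter, Nat.mem_divisors, not_le] at hd ⊢
      obtain ⟨⟨hdvd, hn0⟩, hgt⟩ := hd
      have hdd : n / (n / d) = d := Nat.div_div_self hdvd hn0
      have hcle : n / d ≤ n.sqrt := by
        by_contra hc
        push_neg at hc
        have hmul : d * (n / d) = n := Nat.mul_div_cancel' hdvd
        have : (n.sqrt + 1) * (n.sqrt + 1) ≤ d * (n / d) := Nat.mul_le_mul hgt hc
        omega
      refine ⟨⟨⟨Nat.div_dvd_of_dvd hdvd, hn0⟩, hcle⟩, ?_⟩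
      rw [hdd]
      omega
    · intro k hk
      simp only [Finset.mem_filter, Nat.mem_divisors] at hk
      exact Nat.div_div_self hk.1.1.1 hk.1.1.2
    · intro d hd
      simp only [Finset.mem_filter, Nat.mem_divisors] at hd
      exact Nat.div_div_self hd.1.1 hd.1.2
    · intro k _
      rfl
  rw [hbij]
  exact Finset.sum_filter_add_sum_filter_not n.divisors (· ≤ n.sqrt) g

-- Loop over 1..sqrt with paired contributions = sum over all divisors.
theorem pvLoopDivisors (g : Int → Int) (n : ℕ) :
    pvGenLoop (pvContrib g (n : Int)) (n : Int) 1 0 = ∑ d ∈ n.divisors, g (d : Int) := by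
  have h1 : ((1 : ℕ) : Int) = (1 : Int) := by norm_num
  rw [← h1, pvGenLoop_sum _ n (n.sqrt + 1) 1 0 (by omega), zero_add]
  have : ∀ k ∈ Finset.Ico 1 (n.sqrt + 1),
      pvContrib g (n : Int) (k : Int)
        = (if k ∣ n then g (k : Int) + (if n / k ≠ k then g ((n / k : ℕ) : Int) else 0) else 0) := by
    intro k hk
    have hk1 : 1 ≤ k := (Finset.mem_Ico.mp hk).1
    unfold pvContrib
    rw [PySem.Int.mod_natCast, PySem.Int.floordiv_natCast]
    have hdvd : (((n % k : ℕ) : Int) = 0) ↔ (k ∣ n) := by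
      rw [Nat.cast_eq_zero, ← Nat.dvd_iff_mod_eq_zero]
    have hne : ((((n / k : ℕ) : Int)) ≠ ((k : ℕ) : Int)) ↔ (n / k ≠ k) := by
      constructor <;> intro h hh <;> exact h (by exact_mod_cast hh)
    by_cases hd : k ∣ n
    · rw [if_pos (hdvd.mpr hd), if_pos hd]
      by_cases hq : n / k ≠ k
      · rw [if_pos (hne.mpr hq), if_pos hq]
      · rw [if_neg (fun hh => hq (hne.mp hh)), if_neg hq]
    · rw [if_neg (fun hh => hd (hdvd.mp hh)), if_neg hd]
  rw [Finset.sum_congr rfl this, pvPairSum n (fun k => g (k : Int))]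

theorem pvSigmaVal (m : ℕ) :
    pySigma (m : Int) = ((∑ j ∈ m.divisors, j : ℕ) : Int) := by
  unfold pySigma
  rw [pvSigmaLoop_eq (m : Int) m 1 0 (by omega), pvLoopDivisors id m]
  simp

theorem pvBVal (n : ℕ) :
    sum_of_divisors_of_divisors_alt (n : Int)
      = ((∑ i ∈ n.divisors, ∑ j ∈ i.divisors, j : ℕ) : Int) := by
  unfold sum_of_divisors_of_divisors_alt
  rw [pvOuterLoop_eq (n : Int) n 1 0 (by omega), pvLoopDivisors pySigma n]
  rw [Finset.sum_congr rfl (fun i _ => pvSigmaVal i), Nat.cast_sum]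

-- ===== A-side lemmas (reduce A's nested folds to the divisor double sum) =====

theorem pvFoldlPointwise (F : Int → Int → Int) (g : Int → Int)
    (h : ∀ t x, F t x = t + g x) :
    ∀ (l : List Int) (init : Int), l.foldl F init = init + (l.map g).sum := by
  intro l
  induction l with
  | nil => intro init; simp
  | cons x xs ih => intro init; simp [List.foldl, h, ih, add_assoc]

theorem pvSumMapPyRange (g : Int → Int) :
    ∀ (n : ℕ), ((PySem.List.pyRange 1 ((n : Int) + 1) 1).map g).sum
      = ∑ k ∈ Finset.range n, g ((k : Int) + 1) := by
  intro n
  induction n with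
  | zero => rw [PySem.List.pyRange_one_eq_nil (by norm_num)]; simp
  | succ m ih =>
    have hc : (((m + 1 : ℕ) : Int) + 1) = ((m : Int) + 1) + 1 := by push_cast; ring
    rw [hc, PySem.List.pyRange_one_succ_right (by omega)]
    simp [Finset.sum_range_succ, ih]

theorem pvOuterCast (n : ℕ) (F : ℕ → ℕ) :
    (∑ k ∈ Finset.range n, if PySem.Int.mod (n : Int) ((k : Int) + 1) = 0 then ((F (k + 1) : ℕ) : Int) else 0)
      = ((∑ i ∈ n.divisors, F i : ℕ) : Int) := by
  have hdiv : n.divisors = Finset.filter (· ∣ n) (Finset.Ico 1 (n + 1)) := rfl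
  rw [hdiv, Finset.sum_filter, Finset.sum_Ico_eq_sum_range, Nat.cast_sum]
  apply Finset.sum_congr (by simp)
  intro k _
  have hm : PySem.Int.mod (n : Int) ((k : Int) + 1) = ((n % (k + 1) : ℕ) : Int) := by
    rw [show ((k : Int) + 1) = ((k + 1 : ℕ) : Int) by push_cast; ring, PySem.Int.mod_natCast]
  have hiff : (PySem.Int.mod (n : Int) ((k : Int) + 1) = 0) ↔ ((1 + k) ∣ n) := by
    rw [hm, Nat.cast_eq_zero, ← Nat.dvd_iff_mod_eq_zero, Nat.add_comm 1 k]
  by_cases hc : (1 + k) ∣ n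
  · rw [if_pos (hiff.mpr hc), if_pos hc, Nat.add_comm 1 k]
  · rw [if_neg (fun h => hc (hiff.mp h)), if_neg hc, Nat.cast_zero]

theorem pvInnerSig (k : ℕ) :
    ((PySem.List.pyRange 1 (((k : Int) + 1) + 1) 1).map
        (fun j => if PySem.Int.mod ((k : Int) + 1) j = 0 then j else 0)).sum
      = ((∑ j ∈ (k + 1).divisors, j : ℕ) : Int) := by
  rw [show ((k : Int) + 1) = ((k + 1 : ℕ) : Int) by push_cast; ring, pvSumMapPyRange]
  have h := pvOuterCast (k + 1) id
  simpa using h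

theorem pvAVal (n : ℕ) :
    sum_of_divisors_of_divisors (n : Int)
      = ((∑ i ∈ n.divisors, ∑ j ∈ i.divisors, j : ℕ) : Int) := by
  have hpt : ∀ (t x : Int),
      (if PySem.Int.mod (n : Int) x = 0 then
        (PySem.List.pyRange 1 (x + 1) 1).foldl
          (fun t j => if PySem.Int.mod x j = 0 then t + j else t) t
      else t)
      = t + (if PySem.Int.mod (n : Int) x = 0 then
          ((PySem.List.pyRange 1 (x + 1) 1).map
            (fun j => if PySem.Int.mod x j = 0 then j else 0)).sum else 0) := by
    intro t x
    by_cases hc : PySem.Int.mod (n : Int) x = 0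
    · rw [if_pos hc, if_pos hc,
        pvFoldlPointwise _ (fun j => if PySem.Int.mod x j = 0 then j else 0)
          (by intro a b; by_cases hb : PySem.Int.mod x b = 0 <;> simp [hb])]
    · simp [hc]
  unfold sum_of_divisors_of_divisors
  rw [pvFoldlPointwise _ _ hpt, zero_add, pvSumMapPyRange]
  calc (∑ k ∈ Finset.range n,
          if PySem.Int.mod (n : Int) ((k : Int) + 1) = 0 then
            ((PySem.List.pyRange 1 (((k : Int) + 1) + 1) 1).map
              (fun j => if PySem.Int.mod ((k : Int) + 1) j = 0 then j else 0)).sum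
          else 0)
      = ∑ k ∈ Finset.range n,
          if PySem.Int.mod (n : Int) ((k : Int) + 1) = 0 then
            ((∑ j ∈ (k + 1).divisors, j : ℕ) : Int) else 0 := by
        refine Finset.sum_congr rfl fun k _ => ?_
        by_cases hc : PySem.Int.mod (n : Int) ((k : Int) + 1) = 0
        · rw [if_pos hc, if_pos hc, pvInnerSig k]
        · rw [if_neg hc, if_neg hc]
    _ = _ := pvOuterCast n (fun i => ∑ j ∈ i.divisors, j)

-- ===== VERDICT (by name: the statement is the Claim_ definition above) =====
theorem sum_of_divisors_of_divisors_spec : Claim_equal_sum_of_divisors_of_divisors := by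
  intro N _
  unfold Spec_sum_of_divisors_of_divisors
  rcases (by omega : N ≤ 0 ∨ 0 < N) with hle | hpos
  · unfold sum_of_divisors_of_divisors sum_of_divisors_of_divisors_alt
    rw [PySem.List.pyRange_one_eq_nil (by omega), pyOuterLoop, dif_neg (by omega)]
    rfl
  · have hN : N = ((N.toNat : ℕ) : Int) := by omega
    rw [hN, pvAVal, pvBVal]
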